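-- pv_equiv track=rewrite | github.com/TranNghia1589/rcm_v2 | src/cv/extract_cv_info.py | summarize_projects
-- ===== SOURCE A (Python) =====
-- from typing import Dict, List
--
-- def _uniq(items: list[str]) -> list[str]:
--     out: list[str] = []
--     seen: set[str] = set()
--     for item in items:
--         val = str(item).strip(" -\t")
--         if not val:
--             continue
--         key = val.lower()
--         if key in seen:
--             continue
--         seen.add(key)
--         out.append(val)
--     return out
--
-- def summarize_projects(lines: list[str]) -> List[str]:
--     result: list[str] = []
--     for line in lines:
--         l = line.lower()
--         if "project management" in l:
--             continue
--         if any(k in l for k in ["project", "dashboard", "system", "application"]):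
--             if 15 <= len(line) <= 220:
--                 result.append(line)
--     return _uniq(result)[:8]
-- ===== SOURCE B (Python) =====
-- def summarize_projects(lines: list[str]) -> list[str]:
--     def keep(s: str) -> bool:
--         l = s.lower()
--         return ("project management" not in l
--                 and any(k in l for k in ("project", "dashboard", "system", "application"))
--                 and 15 <= len(s) <= 220
--                 and s.strip(" -\t") != "")
--
--     def key(s: str) -> str:
--         return s.strip(" -\t").lower()
--
--     return [line.strip(" -\t")
--             for i, line in enumerate(lines)
--             if keep(line) and not any(keep(p) and key(p) == key(line) for p in lines[:i])][:8]
-- ===== Notes on version B (the rewrite author's own statement) =====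
-- stated objective: alternative
-- what changed: Replaces A's stateful seen-set/_uniq accumulation with a stateless quadratic first-occurrence comprehension: a line is emitted iff it passes the filter and no earlier line in its prefix passes the filter with the same case-insensitive stripped key; no set, no accumulator, no helper pass.
import Mathlib
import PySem

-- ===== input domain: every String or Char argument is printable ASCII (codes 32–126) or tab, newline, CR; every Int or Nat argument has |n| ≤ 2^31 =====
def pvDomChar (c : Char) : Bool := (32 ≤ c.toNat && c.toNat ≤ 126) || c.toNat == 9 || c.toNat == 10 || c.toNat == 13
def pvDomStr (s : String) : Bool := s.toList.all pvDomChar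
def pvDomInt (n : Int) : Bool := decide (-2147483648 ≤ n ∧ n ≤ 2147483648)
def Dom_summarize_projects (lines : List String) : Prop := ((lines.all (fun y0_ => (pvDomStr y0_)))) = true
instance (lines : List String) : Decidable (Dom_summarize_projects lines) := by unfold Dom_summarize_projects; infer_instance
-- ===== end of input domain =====

-- B replaces A's stateful seen-set/_uniq accumulation by a stateless quadratic first-occurrence
-- comprehension over prefixes (objective: alternative); same return value.

-- ===== PORT A =====
def sp_keywords : List String := ["project", "dashboard", "system", "application"]

-- _uniq's loop: state (out, seen), one step per item
def sp_uniq_loop : List String → List String → PySem.Set String → List String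
  | [], out, _ => out
  | item :: rest, out, seen =>
    let val := PySem.Str.stripChars item " -\t"
    if val = "" then sp_uniq_loop rest out seen
    else
      let key := PySem.Str.lower val
      if PySem.Set.contains seen key then sp_uniq_loop rest out seen
      else sp_uniq_loop rest (out ++ [val]) (PySem.Set.add seen key)

def sp_uniq (items : List String) : List String :=
  sp_uniq_loop items [] PySem.Set.empty

def summarize_projects (lines : List String) : List String :=
  PySem.List.slice (sp_uniq (lines.foldl (fun result line =>
    let l := PySem.Str.lower line
    if PySem.Str.isIn "project management" l then result
    else if sp_keywords.any (fun k => PySem.Str.isIn k l) then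
      if 15 ≤ PySem.Str.len line ∧ PySem.Str.len line ≤ 220 then result ++ [line]
      else result
    else result) [])) none (some 8)

-- ===== PORT B =====
def spb_keep (s : String) : Bool :=
  let l := PySem.Str.lower s
  !(PySem.Str.isIn "project management" l)
  && (["project", "dashboard", "system", "application"].any (fun k => PySem.Str.isIn k l))
  && decide (15 ≤ PySem.Str.len s ∧ PySem.Str.len s ≤ 220)
  && (PySem.Str.stripChars s " -\t" != "")

def spb_key (s : String) : String := PySem.Str.lower (PySem.Str.stripChars s " -\t")

def summarize_projects_alt (lines : List String) : List String :=
  PySem.List.slice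
    ((PySem.List.enumerate lines).filterMap (fun il =>
      if spb_keep il.2
          && !((PySem.List.slice lines none (some il.1)).any
                (fun p => spb_keep p && spb_key p == spb_key il.2))
      then some (PySem.Str.stripChars il.2 " -\t") else none))
    none (some 8)

-- ===== PRECONDITION & SPEC =====
def Spec_summarize_projects (lines : List String) (out : List String) : Prop := out = summarize_projects_alt lines
instance (lines : List String) (out : List String) : Decidable (Spec_summarize_projects lines out) := by unfold Spec_summarize_projects; infer_instance

-- ===== CLAIM (what is proved, stated in full; the proofs are below) =====
def Claim_equal_summarize_projects : Prop := ∀ (lines : List String), Dom_summarize_projects lines → Spec_summarize_projects lines (summarize_projects lines)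

-- ===== LEMMAS AND PROOFS =====

-- A's filter test (without the nonempty-strip condition that _uniq adds later)
def spA_keep (line : String) : Bool :=
  let l := PySem.Str.lower line
  if PySem.Str.isIn "project management" l then false
  else if sp_keywords.any (fun k => PySem.Str.isIn k l) then
    decide (15 ≤ PySem.Str.len line ∧ PySem.Str.len line ≤ 220)
  else false

lemma spb_keep_eq (s : String) :
    spb_keep s = (spA_keep s && (PySem.Str.stripChars s " -\t" != "")) := by
  simp only [spb_keep, spA_keep, sp_keywords]
  by_cases h1 : PySem.Str.isIn "project management" (PySem.Str.lower s) = true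
  · simp only [h1, Bool.not_true, Bool.false_and, if_true, Bool.false_and]
  · simp only [Bool.not_eq_true] at h1
    simp only [h1, Bool.not_false, Bool.true_and, Bool.false_eq_true, if_false]
    by_cases h2 : (["project", "dashboard", "system", "application"].any
        (fun k => PySem.Str.isIn k (PySem.Str.lower s))) = true
    · simp only [h2, if_true, Bool.true_and]
    · simp only [Bool.not_eq_true] at h2
      simp only [h2, Bool.false_and, Bool.false_eq_true, if_false, Bool.false_and]

-- one step of A's filter fold
lemma spA_step (acc : List String) (line : String) :
    (let l := PySem.Str.lower line
     if PySem.Str.isIn "project management" l then acc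
     else if sp_keywords.any (fun k => PySem.Str.isIn k l) then
       if 15 ≤ PySem.Str.len line ∧ PySem.Str.len line ≤ 220 then acc ++ [line]
       else acc
     else acc) = if spA_keep line then acc ++ [line] else acc := by
  simp only [spA_keep]
  by_cases h1 : PySem.Str.isIn "project management" (PySem.Str.lower line) = true
  · simp only [h1, if_true, Bool.false_eq_true, if_false]
  · simp only [Bool.not_eq_true] at h1
    simp only [h1, Bool.false_eq_true, if_false]
    by_cases h2 : (sp_keywords.any (fun k => PySem.Str.isIn k (PySem.Str.lower line))) = true
    · simp only [h2, if_true]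
      by_cases h3 : 15 ≤ PySem.Str.len line ∧ PySem.Str.len line ≤ 220
      · rw [if_pos h3, if_pos (by simp only [decide_eq_true_eq]; exact h3)]
      · rw [if_neg h3, if_neg (by simp only [decide_eq_true_eq]; exact h3)]
    · simp only [Bool.not_eq_true] at h2
      simp only [h2, Bool.false_eq_true, if_false]

-- A's filter fold is List.filter spA_keep
lemma spA_filter (lines : List String) :
    lines.foldl (fun result line =>
      let l := PySem.Str.lower line
      if PySem.Str.isIn "project management" l then result
      else if sp_keywords.any (fun k => PySem.Str.isIn k l) then
        if 15 ≤ PySem.Str.len line ∧ PySem.Str.len line ≤ 220 then result ++ [line]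
        else result
      else result) [] = lines.filter spA_keep := by
  have hfun : (fun (result : List String) line =>
      let l := PySem.Str.lower line
      if PySem.Str.isIn "project management" l then result
      else if sp_keywords.any (fun k => PySem.Str.isIn k l) then
        if 15 ≤ PySem.Str.len line ∧ PySem.Str.len line ≤ 220 then result ++ [line]
        else result
      else result) = (fun result line => if spA_keep line then result ++ [line] else result) := by
    funext acc line; exact spA_step acc line
  rw [hfun, PySem.List.foldl_append_if_eq_filter, List.nil_append]

-- recursive restatement of B's comprehension: rest still to process, prev the prefix already seen
def spB : List String → List String → List String
  | [], _ => []
  | l :: rest, prev =>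
    if spb_keep l && !(prev.any (fun p => spb_keep p && spb_key p == spb_key l))
    then PySem.Str.stripChars l " -\t" :: spB rest (prev ++ [l])
    else spB rest (prev ++ [l])

-- B's enumerate/prefix-slice comprehension computes spB
lemma spB_eq_filterMap (rest prev : List String) :
    (PySem.List.enumerate rest (prev.length : Int)).filterMap (fun il =>
      if spb_keep il.2
          && !((PySem.List.slice (prev ++ rest) none (some il.1)).any
                (fun p => spb_keep p && spb_key p == spb_key il.2))
      then some (PySem.Str.stripChars il.2 " -\t") else none) = spB rest prev := by
  induction rest generalizing prev with
  | nil => simp [PySem.List.enumerate_nil, spB]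
  | cons l rest ih =>
    rw [PySem.List.enumerate_cons, List.filterMap_cons, spB]
    have hsl : PySem.List.slice (prev ++ l :: rest) none (some (prev.length : Int)) = prev := by
      rw [PySem.List.slice_to_natCast]
      exact List.take_left
    have hlen : ((prev.length : Int) + 1) = (((prev ++ [l]).length : Nat) : Int) := by
      simp
    have happ : prev ++ l :: rest = (prev ++ [l]) ++ rest := by simp
    by_cases hc : (spb_keep l
        && !(prev.any (fun p => spb_keep p && spb_key p == spb_key l))) = true
    · simp only [hsl, hc, if_pos]
      rw [hlen, happ, ih (prev ++ [l])]
    · simp only [hsl, hc, Bool.false_eq_true, if_false]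
      rw [hlen, happ, ih (prev ++ [l])]

-- the String key of the new disjunct: BEq facts
lemma sp_contains_add (s : PySem.Set String) (x k : String) :
    PySem.Set.contains (PySem.Set.add s x) k = (PySem.Set.contains s k || x == k) := by
  simp only [PySem.Set.contains, PySem.Set.add, List.contains_eq_mem]
  by_cases hm : x ∈ s
  · by_cases hxk : x = k
    · subst hxk; simp [hm]
    · simp [hm, hxk]
  · by_cases hxk : x = k
    · subst hxk; simp [hm]
    · simp [hm, hxk, Ne.symm hxk]

-- MAIN: _uniq's loop over the spA_keep-filtered suffix equals spB, under the seen-set invariant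
lemma sp_main (rest : List String) :
    ∀ (out : List String) (seen : PySem.Set String) (prev : List String),
    (∀ k, PySem.Set.contains seen k = prev.any (fun p => spb_keep p && spb_key p == k)) →
    sp_uniq_loop (rest.filter spA_keep) out seen = out ++ spB rest prev := by
  induction rest with
  | nil => intro out seen prev _; simp [sp_uniq_loop, spB]
  | cons l rest ih =>
    intro out seen prev hinv
    have hprevstep : ∀ (hkeep : spb_keep l = false) (k : String),
        PySem.Set.contains seen k = (prev ++ [l]).any (fun p => spb_keep p && spb_key p == k) := by
      intro hkeep k
      rw [List.any_append, hinv k]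
      simp [hkeep]
    rw [List.filter_cons, spB]
    by_cases hA : spA_keep l = true
    · rw [if_pos hA]
      show sp_uniq_loop (l :: List.filter spA_keep rest) out seen = _
      rw [sp_uniq_loop]
      by_cases h0 : PySem.Str.stripChars l " -\t" = ""
      · have hkeep : spb_keep l = false := by
          rw [spb_keep_eq]; simp [h0]
        simp only [h0, if_pos, hkeep, Bool.false_and, Bool.false_eq_true, if_false]
        exact ih out seen (prev ++ [l]) (hprevstep hkeep)
      · have hkeep : spb_keep l = true := by
          rw [spb_keep_eq, hA]; simp [h0]
        simp only [h0, ite_false, hkeep, Bool.true_and]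
        have hkey : PySem.Str.lower (PySem.Str.stripChars l " -\t") = spb_key l := rfl
        by_cases hc : PySem.Set.contains seen (spb_key l) = true
        · -- already seen: both skip
          have hany : prev.any (fun p => spb_keep p && spb_key p == spb_key l) = true := by
            rw [← hinv]; exact hc
          simp only [hkey, hc, if_pos, hany, Bool.not_true, Bool.false_eq_true, if_false]
          refine ih out seen (prev ++ [l]) ?_
          intro k
          rw [List.any_append, hinv k]
          simp only [List.any_cons, List.any_nil, Bool.or_false]
          by_cases hxk : spb_key l = k
          · subst hxk
            simp [hany]
          · simp [hkeep, hxk]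
        · -- new key: both emit
          have hany : prev.any (fun p => spb_keep p && spb_key p == spb_key l) = false := by
            rw [← hinv]; simpa using hc
          simp only [Bool.not_eq_true] at hc
          simp only [hkey, hc, Bool.false_eq_true, if_false, hany, Bool.not_false, if_true]
          rw [ih (out ++ [PySem.Str.stripChars l " -\t"]) _ (prev ++ [l]) ?_]
          · simp
          · intro k
            rw [sp_contains_add, List.any_append, hinv k]
            simp only [List.any_cons, List.any_nil, Bool.or_false, hkeep, Bool.true_and]
    · simp only [Bool.not_eq_true] at hA
      have hkeep : spb_keep l = false := by rw [spb_keep_eq, hA]; simp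
      simp only [hA, Bool.false_eq_true, if_false, hkeep, Bool.false_and, Bool.false_eq_true,
        if_false]
      exact ih out seen (prev ++ [l]) (hprevstep hkeep)

-- ===== VERDICT (by name: the statement is the Claim_ definition above) =====
theorem summarize_projects_spec : Claim_equal_summarize_projects := by
  intro lines _
  unfold Spec_summarize_projects summarize_projects summarize_projects_alt sp_uniq
  rw [spA_filter, sp_main lines [] PySem.Set.empty [] (by intro k; rfl), List.nil_append]
  exact congrArg (fun t => PySem.List.slice t none (some 8)) (spB_eq_filterMap lines []).symm
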